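-- pv_equiv track=rewrite | github.com/dachen123/algorithm_training_homework | week1/view_count.py | fieldSum
-- ===== SOURCE A (Python) =====
-- from typing import List
--
-- def fieldSum(v: List[int]) -> int:
--     count = [0 for i in range(len(v))]
--     st = []
--     for i in range(len(v)-1,-1,-1):
--         while st and v[i] > v[st[-1]]:
--             st.pop()
--
--         count[i] = st[-1] - i-1 if st else len(v)-1 -i
--
--         st.append(i)
--     return sum(count )
-- ===== SOURCE B (Python) =====
-- from typing import List
--
-- def fieldSum(v: List[int]) -> int:
--     total = 0
--     for i in range(len(v)):
--         c = 0
--         for j in range(i + 1, len(v)):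
--             if v[j] < v[i]:
--                 c += 1
--             else:
--                 break
--         total += c
--     return total
-- ===== Notes on version B (the rewrite author's own statement) =====
-- stated objective: simpler
-- what changed: Replaced the backward monotonic-stack pass with an auxiliary count array by a direct forward nested scan: for each i count following elements while they are < v[i], stopping at the first >= blocker.
import Mathlib
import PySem

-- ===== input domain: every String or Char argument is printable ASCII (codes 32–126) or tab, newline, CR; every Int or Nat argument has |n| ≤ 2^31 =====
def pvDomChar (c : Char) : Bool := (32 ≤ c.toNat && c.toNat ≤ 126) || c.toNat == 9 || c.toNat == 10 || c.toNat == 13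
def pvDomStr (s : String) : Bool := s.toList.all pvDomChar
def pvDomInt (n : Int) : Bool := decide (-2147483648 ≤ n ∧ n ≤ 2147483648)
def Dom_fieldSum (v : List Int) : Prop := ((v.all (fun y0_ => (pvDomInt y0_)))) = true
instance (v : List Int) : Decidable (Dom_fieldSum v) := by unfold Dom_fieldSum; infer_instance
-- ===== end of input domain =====

-- B replaces A's backward monotonic-stack pass (with an auxiliary count array) by a
-- direct forward nested scan; objective: simpler, not faster.

-- ===== PORT A =====
-- the inner `while st and v[i] > v[st[-1]]: st.pop()` loop; the stack is kept top-first
def popLoop (v : List Int) (vi : Int) : List Nat → List Nat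
  | [] => []
  | t :: rest => if vi > v.getD t 0 then popLoop v vi rest else t :: rest

-- one iteration of the `for i in range(len(v)-1,-1,-1)` body; acc = (count, st)
def stepA (v : List Int) (acc : List Int × List Nat) (i : Nat) : List Int × List Nat :=
  let st := popLoop v (v.getD i 0) acc.2
  let c : Int := match st with
    | [] => (v.length : Int) - 1 - (i : Int)
    | t :: _ => (t : Int) - (i : Int) - 1
  (acc.1.set i c, i :: st)

def fieldSum (v : List Int) : Int :=
  ((((List.range v.length).reverse).foldl (stepA v)
      ((List.range v.length).map (fun _ => (0 : Int)), []))).1.sum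

-- ===== PORT B =====
-- the inner `for j in range(i+1, len(v)): if v[j] < v[i]: c += 1 else: break` loop
def innerCount (vi : Int) : List Int → Int
  | [] => 0
  | x :: xs => if x < vi then 1 + innerCount vi xs else 0

def fieldSum_alt (v : List Int) : Int :=
  (List.range v.length).foldl (fun acc i => acc + innerCount (v.getD i 0) (v.drop (i+1))) 0

-- ===== PRECONDITION & SPEC =====
def Spec_fieldSum (v : List Int) (out : Int) : Prop := out = fieldSum_alt v
instance (v : List Int) (out : Int) : Decidable (Spec_fieldSum v out) := by unfold Spec_fieldSum; infer_instance

-- ===== CLAIM (what is proved, stated in full; the proofs are below) =====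
def Claim_equal_fieldSum : Prop := ∀ (v : List Int), Dom_fieldSum v → Spec_fieldSum v (fieldSum v)

-- ===== LEMMAS AND PROOFS =====

-- v[j] as an integer (indices used by either port are always in range)
def va (v : List Int) (j : Nat) : Int := v.getD j 0

-- B's per-index count
def cB (v : List Int) (i : Nat) : Int := innerCount (va v i) (v.drop (i+1))

-- j is a running maximum of v over [i, j]
def goodQ (v : List Int) (i j : Nat) : Bool := decide (∀ k, k < j → i ≤ k → va v k ≤ va v j)

-- the stack A holds after having processed indices ≥ i (top first, ascending)
def stSpec (v : List Int) (i : Nat) : List Nat :=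
  (List.range' i (v.length - i)).filter (fun j => goodQ v i j)

-- the count array after having processed indices ≥ i
def countSpec (v : List Int) (i : Nat) : List Int :=
  (List.range v.length).map (fun j => if i ≤ j then cB v j else 0)

lemma mem_stSpec {v : List Int} {i j : Nat} :
    j ∈ stSpec v i ↔ (i ≤ j ∧ j < v.length ∧ ∀ k, k < j → i ≤ k → va v k ≤ va v j) := by
  simp only [stSpec, goodQ, List.mem_filter, List.mem_range', decide_eq_true_eq]
  constructor
  · rintro ⟨⟨m, hm, rfl⟩, h⟩; exact ⟨by omega, by omega, h⟩
  · rintro ⟨h1, h2, h⟩; exact ⟨⟨j - i, by omega, by omega⟩, h⟩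

lemma pairwise_lt_stSpec (v : List Int) (i : Nat) :
    (stSpec v i).Pairwise (· < ·) :=
  (List.pairwise_lt_range' 1).filter _

lemma pairwise_le_stSpec (v : List Int) (i : Nat) :
    (stSpec v i).Pairwise (fun a b => va v a ≤ va v b) := by
  refine (pairwise_lt_stSpec v i).imp_of_mem ?_
  intro a b ha hb hab
  rcases mem_stSpec.1 ha with ⟨hia, _, _⟩
  rcases mem_stSpec.1 hb with ⟨_, _, hQ⟩
  exact hQ a hab hia

lemma popLoop_eq_filter (v : List Int) (x : Int) (l : List Nat)
    (h : l.Pairwise (fun a b => va v a ≤ va v b)) :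
    popLoop v x l = l.filter (fun j => decide (x ≤ va v j)) := by
  induction l with
  | nil => rfl
  | cons t rest ih =>
    rcases List.pairwise_cons.1 h with ⟨ht, hrest⟩
    have e : popLoop v x (t :: rest) = if v.getD t 0 < x then popLoop v x rest else t :: rest := rfl
    by_cases hx : v.getD t 0 < x
    · have h1 : (decide (x ≤ va v t)) = false := by
        simp only [va, decide_eq_false_iff_not]; omega
      rw [e, if_pos hx, ih hrest, List.filter_cons, h1]
      simp
    · have h1 : (decide (x ≤ va v t)) = true := by
        simp only [va, decide_eq_true_eq]; omega
      have h2 : List.filter (fun j => decide (x ≤ va v j)) rest = rest :=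
        List.filter_eq_self.2 (fun j hj => by
          simp only [va, decide_eq_true_eq]
          exact le_trans (not_lt.1 hx) (ht j hj))
      rw [e, if_neg hx, List.filter_cons, h1]
      simp [h2]

lemma stSpec_step {v : List Int} {i : Nat} (hi : i < v.length) :
    stSpec v i = i :: popLoop v (va v i) (stSpec v (i+1)) := by
  rw [popLoop_eq_filter v _ _ (pairwise_le_stSpec v (i+1))]
  unfold stSpec
  have hr : List.range' i (v.length - i) = i :: List.range' (i+1) (v.length - (i+1)) := by
    have h : v.length - i = (v.length - (i+1)) + 1 := by omega
    rw [h, List.range'_succ]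
  have hgi : goodQ v i i = true := by
    simp only [goodQ, decide_eq_true_eq]
    intro k h1 h2; omega
  rw [hr, List.filter_cons, hgi]
  simp only [if_pos trivial, List.filter_filter]
  congr 1
  apply List.filter_congr
  intro j hj
  have hij : i + 1 ≤ j := (List.mem_range'_1.1 hj).1
  have hiff : (∀ k, k < j → i ≤ k → va v k ≤ va v j) ↔
      (va v i ≤ va v j ∧ ∀ k, k < j → i + 1 ≤ k → va v k ≤ va v j) := by
    constructor
    · intro hA; exact ⟨hA i (by omega) le_rfl, fun k h1 h2 => hA k h1 (by omega)⟩
    · rintro ⟨h0, hA⟩ k h1 h2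
      rcases Nat.eq_or_lt_of_le h2 with h | h
      · exact h ▸ h0
      · exact hA k h1 h
  simp only [goodQ, decide_eq_true_eq]
  simp [hiff, Bool.and_comm]

lemma innerCount_eq_takeWhile (x : Int) (l : List Int) :
    innerCount x l = ((l.takeWhile (fun y => decide (y < x))).length : Int) := by
  induction l with
  | nil => rfl
  | cons y ys ih =>
    by_cases hy : y < x
    · simp [innerCount, List.takeWhile_cons, hy, ih]; push_cast; ring
    · simp [innerCount, List.takeWhile_cons, hy]

lemma takeWhile_length_eq {α : Type} (p : α → Bool) (l : List α) (m : Nat) (hm : m ≤ l.length)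
    (h1 : ∀ k (hk : k < m), p (l[k]'(by omega)) = true)
    (h2 : ∀ (hk : m < l.length), p (l[m]'hk) = false) :
    (l.takeWhile p).length = m := by
  induction l generalizing m with
  | nil =>
    simp only [List.length_nil] at hm
    simp only [List.takeWhile_nil, List.length_nil]; omega
  | cons x xs ih =>
    cases m with
    | zero =>
      have := h2 (by simp)
      simp at this
      simp [List.takeWhile_cons, this]
    | succ m' =>
      have hx : p x = true := by simpa using h1 0 (Nat.succ_pos _)
      have : (xs.takeWhile p).length = m' := by
        refine ih m' (by simpa using hm) ?_ ?_
        · intro k hk; simpa using h1 (k+1) (by omega)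
        · intro hk; simpa using h2 (by simpa using Nat.succ_lt_succ hk)
      simp [List.takeWhile_cons, hx, this]

lemma cB_char {v : List Int} {i : Nat} (hi : i < v.length) :
    cB v i = (match popLoop v (va v i) (stSpec v (i+1)) with
      | [] => (v.length : Int) - 1 - (i : Int)
      | t :: _ => (t : Int) - (i : Int) - 1) := by
  have hfil := popLoop_eq_filter v (va v i) (stSpec v (i+1)) (pairwise_le_stSpec v (i+1))
  have hmem : ∀ j, j ∈ popLoop v (va v i) (stSpec v (i+1)) ↔
      (i+1 ≤ j ∧ j < v.length ∧ (∀ k, k < j → i+1 ≤ k → va v k ≤ va v j) ∧ va v i ≤ va v j) := by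
    intro j
    rw [hfil]
    simp only [List.mem_filter, mem_stSpec, decide_eq_true_eq]
    tauto
  -- the least index > i whose value is ≥ v[i] is in the popped stack
  have hleast : ∀ (hex : ∃ j, i+1 ≤ j ∧ j < v.length ∧ va v i ≤ va v j),
      Nat.find hex ∈ popLoop v (va v i) (stSpec v (i+1)) := by
    intro hex
    obtain ⟨hj1, hj2, hj3⟩ := Nat.find_spec hex
    refine (hmem _).2 ⟨hj1, hj2, ?_, hj3⟩
    intro k hk1 hk2
    have hk3 : ¬ (i+1 ≤ k ∧ k < v.length ∧ va v i ≤ va v k) := Nat.find_min hex hk1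
    push_neg at hk3
    have : va v k < va v i := hk3 hk2 (by omega)
    exact le_trans this.le hj3
  have hdropgd : ∀ (k : Nat) (hk : k < v.length - (i+1)),
      ((v.drop (i+1))[k]'(by simp; omega)) = va v (i+1+k) := by
    intro k hk
    rw [List.getElem_drop, va, List.getD_eq_getElem v 0 (by omega)]
  cases hr : popLoop v (va v i) (stSpec v (i+1)) with
  | nil =>
    have hall : ∀ j, i+1 ≤ j → j < v.length → va v j < va v i := by
      intro j h1 h2
      by_contra hge
      push_neg at hge
      have hex : ∃ j, i+1 ≤ j ∧ j < v.length ∧ va v i ≤ va v j := ⟨j, h1, h2, hge⟩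
      have := hleast hex
      rw [hr] at this
      simp at this
    have hlen : ((v.drop (i+1)).takeWhile (fun y => decide (y < va v i))).length
        = v.length - (i+1) := by
      refine takeWhile_length_eq _ _ _ (by simp) ?_ ?_
      · intro k hk
        have hk' : k < v.length - (i+1) := by simpa using hk
        rw [hdropgd k hk']
        exact decide_eq_true (hall _ (by omega) (by omega))
      · intro hk
        simp at hk
    unfold cB
    rw [innerCount_eq_takeWhile, hlen]
    push_cast [Nat.cast_sub (by omega : i + 1 ≤ v.length)]
    ring
  | cons t rest =>
    have htmem : t ∈ popLoop v (va v i) (stSpec v (i+1)) := by rw [hr]; exact List.mem_cons_self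
    obtain ⟨ht1, ht2, htQ, htge⟩ := (hmem t).1 htmem
    have hmin : ∀ k, i+1 ≤ k → k < t → va v k < va v i := by
      intro k hk1 hk2
      by_contra hge
      push_neg at hge
      have hex : ∃ j, i+1 ≤ j ∧ j < v.length ∧ va v i ≤ va v j := ⟨k, hk1, by omega, hge⟩
      have hj0 := hleast hex
      have hj0le : Nat.find hex ≤ k := Nat.find_min' hex ⟨hk1, by omega, hge⟩
      rw [hr] at hj0
      have hpw : (t :: rest).Pairwise (· < ·) := by
        rw [← hr, hfil]
        exact (pairwise_lt_stSpec v (i+1)).filter _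
      rcases List.mem_cons.1 hj0 with h | h
      · omega
      · have := (List.pairwise_cons.1 hpw).1 _ h
        omega
    have hlen : ((v.drop (i+1)).takeWhile (fun y => decide (y < va v i))).length
        = t - (i+1) := by
      refine takeWhile_length_eq _ _ _ (by simp; omega) ?_ ?_
      · intro k hk
        rw [hdropgd k (by omega)]
        exact decide_eq_true (hmin _ (by omega) (by omega))
      · intro hk
        have hkl : t - (i+1) < v.length - (i+1) := by simpa using hk
        rw [hdropgd _ hkl]
        have : i + 1 + (t - (i+1)) = t := by omega
        rw [this]
        simp
        omega
    unfold cB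
    rw [innerCount_eq_takeWhile, hlen]
    push_cast [Nat.cast_sub (by omega : i + 1 ≤ t)]
    ring

lemma countSpec_step {v : List Int} {i : Nat} (hi : i < v.length) :
    (countSpec v (i+1)).set i (cB v i) = countSpec v i := by
  apply List.ext_getElem
  · simp [countSpec]
  · intro j h1 h2
    have hj : j < v.length := by simpa [countSpec] using h2
    rw [List.getElem_set]
    by_cases hij : i = j
    · simp [hij, countSpec]
    · simp only [if_neg hij, countSpec, List.getElem_map, List.getElem_range]
      by_cases h : i ≤ j
      · rw [if_pos (by omega), if_pos h]
      · rw [if_neg (by omega), if_neg h]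

lemma loop_invariant (v : List Int) (d : Nat) (hd : d ≤ v.length) :
    ((List.range' (v.length - d) d).reverse).foldl (stepA v)
        ((List.range v.length).map (fun _ => (0 : Int)), [])
      = (countSpec v (v.length - d), stSpec v (v.length - d)) := by
  induction d with
  | zero =>
    simp only [List.range'_zero, List.reverse_nil, List.foldl_nil, Nat.sub_zero]
    refine Prod.ext ?_ ?_
    · apply List.map_congr_left
      intro j hj
      rw [if_neg (by simp at hj; omega)]
    · simp [stSpec]
  | succ d ih =>
    have hd' : d <= v.length := by omega
    set i := v.length - (d+1) with hidef
    have hi : i < v.length := by omega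
    have hsplit : List.range' i (d+1) = i :: List.range' (i+1) d := List.range'_succ
    have hnd : v.length - d = i + 1 := by omega
    rw [hsplit, List.reverse_cons, List.foldl_append, List.foldl_cons, List.foldl_nil]
    rw [<- hnd, ih hd', hnd]
    show stepA v (countSpec v (i+1), stSpec v (i+1)) i = _
    unfold stepA
    simp only
    have hcb := cB_char hi
    unfold va at hcb
    rw [<- hcb]
    exact Prod.ext (countSpec_step hi) (stSpec_step hi).symm

-- ===== VERDICT (by name: the statement is the Claim_ definition above) =====
theorem fieldSum_spec : Claim_equal_fieldSum := by
  intro v _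
  show fieldSum v = fieldSum_alt v
  unfold fieldSum fieldSum_alt
  have hinv := loop_invariant v v.length le_rfl
  rw [Nat.sub_self] at hinv
  rw [<- List.range_eq_range'] at hinv
  rw [hinv]
  have hc0 : countSpec v 0 = (List.range v.length).map (cB v) := by
    apply List.map_congr_left
    intro j hj
    rw [if_pos (Nat.zero_le j)]
  show (countSpec v 0).sum = _
  rw [hc0, List.sum_eq_foldl, List.foldl_map]
  rfl
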